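-- pv_equiv track=rewrite | github.com/shantanugoel/cryptopals-solutions | solutions-python3/08-detect-aes-ecb.py | repetition_score
-- ===== SOURCE A (Python) =====
-- def repetition_score(line):
--   length = len(line)
--   score =0
--   for i in range(0, length, 32):
--     for j in range(i + 32, length, 32):
--       if line[i:i + 32] == line[j:j+32]:
--         score +=1
--   return score
-- ===== SOURCE B (Python) =====
-- def repetition_score(line):
--   counts = {}
--   for i in range(0, len(line), 32):
--     block = line[i:i + 32]
--     counts[block] = counts.get(block, 0) + 1
--   return sum(c * (c - 1) // 2 for c in counts.values())
-- ===== Notes on version B (the rewrite author's own statement) =====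
-- stated objective: faster
-- what changed: Replaced the quadratic all-pairs block comparison with a single pass that counts each 32-char block in a dict and sums c*(c-1)//2 over the counts.
import Mathlib
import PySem

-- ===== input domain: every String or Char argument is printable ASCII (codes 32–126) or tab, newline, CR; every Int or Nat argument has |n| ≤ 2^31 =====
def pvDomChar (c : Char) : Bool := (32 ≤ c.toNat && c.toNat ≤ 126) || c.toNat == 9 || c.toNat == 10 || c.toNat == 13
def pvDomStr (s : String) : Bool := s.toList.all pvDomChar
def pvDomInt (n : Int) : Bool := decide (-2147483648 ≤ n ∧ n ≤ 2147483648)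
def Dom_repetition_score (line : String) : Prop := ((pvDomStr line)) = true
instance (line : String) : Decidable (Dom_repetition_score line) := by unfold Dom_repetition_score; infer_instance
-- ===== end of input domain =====

-- B replaces A's quadratic all-pairs block comparison with one counting pass over the blocks plus a sum of c*(c-1)//2.


-- ===== PORT A =====
def repetition_score (line : String) : Int :=
  let s := line.toList
  let length : Int := (s.length : Int)
  (PySem.List.pyRange 0 length 32).foldl
    (fun score i =>
      (PySem.List.pyRange (i + 32) length 32).foldl
        (fun score j =>
          if PySem.List.slice s (some i) (some (i + 32))
             = PySem.List.slice s (some j) (some (j + 32)) then score + 1 else score)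
        score)
    0

-- ===== PORT B =====
def repetition_score_alt (line : String) : Int :=
  let s := line.toList
  let counts : PySem.Dict (List Char) Int :=
    (PySem.List.pyRange 0 (s.length : Int) 32).foldl
      (fun d i =>
        let block := PySem.List.slice s (some i) (some (i + 32))
        d.insert block (d.getD block 0 + 1))
      PySem.Dict.empty
  (counts.values.map (fun c => PySem.Int.floordiv (c * (c - 1)) 2)).sum

-- ===== PRECONDITION & SPEC =====
def Spec_repetition_score (line : String) (out : Int) : Prop := out = repetition_score_alt line
instance (line : String) (out : Int) : Decidable (Spec_repetition_score line out) := by unfold Spec_repetition_score; infer_instance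

-- ===== CLAIM (what is proved, stated in full; the proofs are below) =====
def Claim_equal_repetition_score : Prop := ∀ (line : String), Dom_repetition_score line → Spec_repetition_score line (repetition_score line)

-- ===== LEMMAS AND PROOFS =====
-- number of pairs p < q with equal elements, scanning left to right
def pvPairs {α : Type} [DecidableEq α] : List α → Nat
  | [] => 0
  | x :: t => t.countP (fun y => decide (x = y)) + pvPairs t

-- step-32 range induction forms (derived from PySem.List.pyRange_of_pos)
lemma pvRange32_nil (a b : Int) (h : b ≤ a) : PySem.List.pyRange a b 32 = [] := by
  rw [PySem.List.pyRange_of_pos a b (by norm_num)]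
  simp [if_neg (by omega : ¬ a < b)]

lemma pvRange32_cons (a b : Int) (h : a < b) :
    PySem.List.pyRange a b 32 = a :: PySem.List.pyRange (a + 32) b 32 := by
  rw [PySem.List.pyRange_of_pos a b (by norm_num),
      PySem.List.pyRange_of_pos (a + 32) b (by norm_num)]
  have hM : ((b - a + 32 - 1) / 32).toNat = (if a + 32 < b then ((b - (a + 32) + 32 - 1) / 32).toNat else 0) + 1 := by
    split_ifs with h2
    · have := Int.mul_ediv_add_emod (b - a + 31) 32
      omega
    · have h1 : (b - a + 32 - 1) / 32 = 1 := by omega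
      omega
  rw [if_pos h, hM, List.range_succ_eq_map]
  simp only [List.map_cons, List.map_map]
  refine List.cons_eq_cons.mpr ⟨by omega, List.map_congr_left ?_⟩
  intro k _
  simp only [Function.comp_apply, Nat.succ_eq_add_one]
  push_cast
  ring


-- the 32-char block starting at i
def pvBlk (s : List Char) (i : Int) : List Char := PySem.List.slice s (some i) (some (i + 32))

-- A's nested loop counts, for each block, the later equal blocks: it is pvPairs of the block list
lemma pvOuter (s : List Char) (n : Int) :
    ∀ (fuel : Nat) (a init : Int), (n - a).toNat ≤ fuel →
    (PySem.List.pyRange a n 32).foldl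
      (fun score i => (PySem.List.pyRange (i + 32) n 32).foldl
        (fun score j => if pvBlk s i = pvBlk s j then score + 1 else score) score) init
    = init + (pvPairs ((PySem.List.pyRange a n 32).map (pvBlk s)) : Int) := by
  intro fuel
  induction fuel with
  | zero =>
    intro a init h
    rw [pvRange32_nil a n (by omega)]
    simp [pvPairs]
  | succ fuel ih =>
    intro a init h
    by_cases hab : n ≤ a
    · rw [pvRange32_nil a n hab]; simp [pvPairs]
    · rw [pvRange32_cons a n (by omega)]
      simp only [List.foldl_cons, List.map_cons, pvPairs]
      rw [PySem.List.foldl_ite_add_one (fun j => pvBlk s a = pvBlk s j),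
          ih (a + 32) _ (by omega),
          List.countP_map]
      simp only [Function.comp_def]
      push_cast
      ring

-- ∑ over a list avoiding x of (g k + indicator) = ∑ g
lemma pvSum_notmem {α : Type} [DecidableEq α] (g : α → Nat) (x : α) (d : Nat) :
    ∀ (S : List α), x ∉ S →
    (S.map (fun k => g k + if k = x then d else 0)).sum = (S.map g).sum := by
  intro S
  induction S with
  | nil => intro _; simp
  | cons y t iht =>
    intro hx
    have hy : ¬ y = x := fun h => hx (h ▸ List.mem_cons_self)
    simp only [List.map_cons, List.sum_cons, if_neg hy,
      iht (fun h => hx (List.mem_cons_of_mem _ h))]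
    omega

-- ∑ over a nodup list containing x of (g k + indicator at x of d) = ∑ g + d
lemma pvSum_mem {α : Type} [DecidableEq α] (g : α → Nat) (x : α) (d : Nat) :
    ∀ (S : List α), S.Nodup → x ∈ S →
    (S.map (fun k => g k + if k = x then d else 0)).sum = (S.map g).sum + d := by
  intro S
  induction S with
  | nil => intro _ hx; cases hx
  | cons y t iht =>
    intro hnd hx
    rcases List.nodup_cons.mp hnd with ⟨hyt, hndt⟩
    by_cases hyx : y = x
    · subst hyx
      simp [pvSum_notmem g y d t hyt]
      omega
    · rcases List.mem_cons.mp hx with h | hxt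
      · exact absurd h.symm hyx
      · simp only [List.map_cons, List.sum_cons, if_neg hyx, iht hndt hxt]
        omega

-- the number of equal pairs is the sum of (count choose 2) over any nodup cover of the elements
lemma pvPairs_eq {α : Type} [DecidableEq α] (S : List α) (hS : S.Nodup) :
    ∀ (l : List α), (∀ y ∈ l, y ∈ S) →
    pvPairs l = (S.map (fun k => (l.countP (fun y => decide (k = y))).choose 2)).sum := by
  intro l
  induction l with
  | nil => intro _; simp [pvPairs]
  | cons x t iht =>
    intro hcov
    have hx : x ∈ S := hcov x List.mem_cons_self
    have hstep : ∀ k, ((x :: t).countP (fun y => decide (k = y))).choose 2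
        = (t.countP (fun y => decide (k = y))).choose 2 + (if k = x then t.countP (fun y => decide (x = y)) else 0) := by
      intro k
      by_cases hk : k = x
      · subst hk
        simp [Nat.choose_succ_succ]
        omega
      · simp [hk]
    have hmap : S.map (fun k => ((x :: t).countP (fun y => decide (k = y))).choose 2)
        = S.map (fun k => (t.countP (fun y => decide (k = y))).choose 2
            + (if k = x then t.countP (fun y => decide (x = y)) else 0)) :=
      List.map_congr_left (fun k _ => hstep k)
    rw [hmap, pvSum_mem _ x _ S hS hx,
        ← iht (fun y hy => hcov y (List.mem_cons_of_mem _ hy))]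
    simp [pvPairs]
    omega

-- List.count as the countP pvPairs_eq speaks about
lemma pvCount_eq (l : List (List Char)) (k : List Char) :
    List.count k l = List.countP (fun y => decide (k = y)) l := by
  rw [List.count_eq_countP]
  apply List.countP_congr
  intro y _
  rw [Bool.beq_eq_decide_eq]
  simp only [decide_eq_true_eq]
  exact eq_comm

-- c*(c-1)//2 on a cast count is (count choose 2)
lemma pvChoose2 (m : Nat) :
    PySem.Int.floordiv ((m : Int) * ((m : Int) - 1)) 2 = (m.choose 2 : Int) := by
  rw [PySem.Int.floordiv_eq_ediv_of_pos (by norm_num)]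
  cases m with
  | zero => simp
  | succ m =>
    rw [Nat.choose_two_right]
    push_cast [Int.natCast_div]
    ring_nf

-- B computes the sum of (count choose 2) over the distinct blocks
lemma pvB_eq (line : String) :
    repetition_score_alt line
      = ((PySem.Set.ofList ((PySem.List.pyRange 0 ((line.toList.length : Int)) 32).map (pvBlk line.toList))).map
          (fun k => ((((PySem.List.pyRange 0 ((line.toList.length : Int)) 32).map (pvBlk line.toList)).countP
              (fun y => decide (k = y))).choose 2 : Int))).sum := by
  unfold repetition_score_alt
  simp only []
  rw [show (PySem.List.pyRange 0 ((line.toList.length : Int)) 32).foldl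
        (fun (d : PySem.Dict (List Char) Int) i =>
          let block := PySem.List.slice line.toList (some i) (some (i + 32))
          d.insert block (d.getD block 0 + 1)) PySem.Dict.empty
      = PySem.Dict.counter ((PySem.List.pyRange 0 ((line.toList.length : Int)) 32).map (pvBlk line.toList)) from by
        rw [← PySem.Dict.foldl_insert_getD_add_one_eq_counter, List.foldl_map]
        rfl]
  rw [show (PySem.Dict.counter ((PySem.List.pyRange 0 ((line.toList.length : Int)) 32).map (pvBlk line.toList))).values
      = ((PySem.Dict.counter ((PySem.List.pyRange 0 ((line.toList.length : Int)) 32).map (pvBlk line.toList))).items.map Prod.snd) from rfl,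
    PySem.Dict.items_counter]
  simp only [List.map_map]
  apply congrArg
  apply List.map_congr_left
  intro k _
  simp only [Function.comp_apply]
  rw [← pvCount_eq]
  exact pvChoose2 _

-- ===== VERDICT (by name: the statement is the Claim_ definition above) =====
theorem repetition_score_spec : Claim_equal_repetition_score := by
  unfold Claim_equal_repetition_score Spec_repetition_score
  intro line _
  have hA : repetition_score line
      = 0 + (pvPairs ((PySem.List.pyRange 0 ((line.toList.length : Int)) 32).map (pvBlk line.toList)) : Int) :=
    pvOuter line.toList ((line.toList.length : Int)) (((line.toList.length : Int)) - 0).toNat 0 0 le_rfl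
  rw [hA, pvB_eq line, zero_add,
    pvPairs_eq (PySem.Set.ofList ((PySem.List.pyRange 0 ((line.toList.length : Int)) 32).map (pvBlk line.toList)))
      (PySem.Set.nodup_ofList _) _
      (fun y hy => (PySem.Set.mem_ofList _ y).mpr hy),
    Nat.cast_list_sum, List.map_map]
  rfl
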